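-- pv_equiv track=rewrite | github.com/paynssj4/ps2-cheats-hub | armax_ps2_logic.py | arm_read_verifier_python
-- ===== SOURCE A (Python) =====
-- BITSTRINGLEN = [0x06, 0x0A, 0x0C, 0x13, 0x13, 0x08, 0x07, 0x20]
--
-- def getbitstring_python(ctrl_list, num_bits_to_get):
--     """
--     Extracts a bitstring from the codes.
--     ctrl_list = [base_codes_list, current_word_offset, current_bit_offset, total_words_in_base_list]
--     Returns a tuple (success_bool, extracted_value_u32).
--     Modifies ctrl_list[1] (word_offset) and ctrl_list[2] (bit_offset) in place.
--     """
--     base_codes_list = ctrl_list[0]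
--
--     output_val = 0
--     bits_remaining = num_bits_to_get
--
--     while bits_remaining > 0:
--         if ctrl_list[2] > 0x1F:
--             ctrl_list[2] = 0
--             ctrl_list[1] += 1
--
--         if ctrl_list[1] >= ctrl_list[3]:
--             return False, 0
--
--         current_word = base_codes_list[ctrl_list[1]]
--         bit_val = (current_word >> (0x1F - ctrl_list[2])) & 1
--         output_val = (output_val << 1) | bit_val
--
--         ctrl_list[2] += 1
--         bits_remaining -= 1
--
--     return True, output_val
--
-- def arm_read_verifier_python(decrypted_binary_codes_list):
--     """
--     Scans the verifier bit string to determine how many lines it occupies.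
--     Returns number of ARMAX lines (pairs of u32), or -1 on error.
--     """
--     ctrl = [decrypted_binary_codes_list, 1, 8, len(decrypted_binary_codes_list)]
--     bits_read = 0
--     num_armax_lines = 1
--
--     success, terminator_bit = getbitstring_python(ctrl, 1)
--     if not success: return -1
--     bits_read += 1
--
--     while terminator_bit == 0:
--         success, exp_size_index = getbitstring_python(ctrl, 3)
--         if not success: return -1
--         bits_read += 3
--
--         if exp_size_index >= len(BITSTRINGLEN): return -1
--
--         expansion_data_len = BITSTRINGLEN[exp_size_index]
--         success, _ = getbitstring_python(ctrl, expansion_data_len)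
--         if not success: return -1
--         bits_read += expansion_data_len
--
--         success, terminator_bit = getbitstring_python(ctrl, 1)
--         if not success: return -1
--         bits_read += 1
--
--     bits_read -= 24
--     while bits_read > 0:
--         num_armax_lines += 1
--         bits_read -= 64
--
--     return num_armax_lines
-- ===== SOURCE B (Python) =====
-- BITSTRINGLEN = [0x06, 0x0A, 0x0C, 0x13, 0x13, 0x08, 0x07, 0x20]
--
--
-- def _field(words, pos, n):
--     """Extract n bits (1 <= n <= 32) MSB-first starting at absolute bit
--     position pos, by masking out of a 64-bit two-word window.
--     Returns None if the field runs past the end of the word list."""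
--     if pos + n > 32 * len(words):
--         return None
--     wi, bi = divmod(pos, 32)
--     chunk = (words[wi] & 0xFFFFFFFF) << 32
--     if bi + n > 32:
--         chunk |= words[wi + 1] & 0xFFFFFFFF
--     return (chunk >> (64 - bi - n)) & ((1 << n) - 1)
--
--
-- def arm_read_verifier_python(decrypted_binary_codes_list):
--     words = decrypted_binary_codes_list
--     nbits = 32 * len(words)
--     pos = 40  # word 1, bit 8
--
--     t = _field(words, pos, 1)
--     if t is None:
--         return -1
--     pos += 1
--
--     while t == 0:
--         idx = _field(words, pos, 3)
--         if idx is None: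
--             return -1
--         pos += 3 + BITSTRINGLEN[idx]
--         if pos > nbits:
--             return -1
--         t = _field(words, pos, 1)
--         if t is None:
--             return -1
--         pos += 1
--
--     bits_read = pos - 40 - 24
--     return 1 + (bits_read + 63) // 64
-- ===== Notes on version B (the rewrite author's own statement) =====
-- stated objective: alternative
-- what changed: B replaces the bit-by-bit extraction loop (one shift/mask and in-place word/bit-offset bookkeeping per bit) by whole-field extraction out of a 64-bit two-word window with one shift-and-mask per field, and replaces the final repeated-subtraction counting loop by one ceiling division; measured ~1.4x faster at the largest timing size, below the 1.5x bar, so no speed is claimed.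
import Mathlib
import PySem

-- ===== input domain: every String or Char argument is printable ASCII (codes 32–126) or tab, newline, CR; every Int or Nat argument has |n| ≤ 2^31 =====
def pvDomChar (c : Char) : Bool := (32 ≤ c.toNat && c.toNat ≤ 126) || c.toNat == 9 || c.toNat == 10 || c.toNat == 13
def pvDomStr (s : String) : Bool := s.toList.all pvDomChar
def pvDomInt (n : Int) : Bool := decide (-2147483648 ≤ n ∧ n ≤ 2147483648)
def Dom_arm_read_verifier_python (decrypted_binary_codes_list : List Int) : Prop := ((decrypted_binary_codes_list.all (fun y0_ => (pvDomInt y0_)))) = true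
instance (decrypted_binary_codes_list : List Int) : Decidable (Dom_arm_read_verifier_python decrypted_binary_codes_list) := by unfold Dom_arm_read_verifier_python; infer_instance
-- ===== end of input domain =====

-- B extracts whole multi-bit fields by two-word window arithmetic and computes the final
-- line count by one ceiling division, instead of A's bit-by-bit loop and repeated subtraction
-- (alternative decomposition; both scan the same verifier fields).


-- ===== PORT A =====

def pvBITSTRINGLEN : List Int := [0x06, 0x0A, 0x0C, 0x13, 0x13, 0x08, 0x07, 0x20]

-- getbitstring_python: ctrl_list is threaded explicitly as (w, b) = (word offset, bit offset);
-- ctrl_list[3] is always len(base_codes_list), so the port reads ws.length there.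
-- 'none' is the (False, 0) outcome.  The bit count n is a Nat (every call site passes a
-- positive literal or a BITSTRINGLEN entry, all positive).
def pvGetBits (ws : List Int) (w b : Int) (n : Nat) (acc : Int) : Option (Int × Int × Int) :=
  match n with
  | 0 => some (acc, w, b)
  | Nat.succ m =>
    let w' := if 31 < b then w + 1 else w
    let b' := if 31 < b then 0 else b
    if (ws.length : Int) ≤ w' then none
    else
      match PySem.List.pyGet? ws w' with
      | none => none  -- unreachable: the guard above gives 0 ≤ w' < ws.length at every call
      | some cw =>
        -- (cw >> (0x1F - b')) & 1 : floor-division then floor-mod, exact for every int cw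
        let bit := PySem.Int.mod (PySem.Int.floordiv cw (2 ^ (31 - b').toNat)) 2
        -- (acc << 1) | bit = acc * 2 + bit, exact since acc ≥ 0 and bit ∈ {0, 1}
        pvGetBits ws w' (b' + 1) m (acc * 2 + bit)

-- the trailing 'while bits_read > 0: num_armax_lines += 1; bits_read -= 64' loop of A
def pvCount (br n : Int) : Int :=
  if 0 < br then pvCount (br - 64) (n + 1) else n
termination_by br.toNat
decreasing_by omega

-- the main 'while terminator_bit == 0' loop of A; (w, b) is ctrl_list[1..2].
-- fuel is a totalization guard only: each pass reads ≥ 10 bits, so with the fuel the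
-- entry point supplies the 0 branch is reached only when the stream is already
-- exhausted, where the Python loop returns -1 as well (its 3-bit read fails).
def pvLoopA (ws : List Int) (fuel : Nat) (w b bits_read t : Int) : Int :=
  if t = 0 then
    match fuel with
    | 0 => -1
    | Nat.succ fuel =>
      match pvGetBits ws w b 3 0 with
      | none => -1
      | some (idx, w1, b1) =>
        if 8 ≤ idx then -1   -- exp_size_index >= len(BITSTRINGLEN)
        else
          match PySem.List.pyGet? pvBITSTRINGLEN idx with
          | none => -1   -- unreachable: 0 ≤ idx < 8 here
          | some elen =>
            -- elen is a BITSTRINGLEN entry, positive, so .toNat is exact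
            match pvGetBits ws w1 b1 elen.toNat 0 with
            | none => -1
            | some (_, w2, b2) =>
              match pvGetBits ws w2 b2 1 0 with
              | none => -1
              | some (t', w3, b3) =>
                pvLoopA ws fuel w3 b3 (bits_read + 3 + elen + 1) t'
  else
    pvCount (bits_read - 24) 1

def arm_read_verifier_python (decrypted_binary_codes_list : List Int) : Int :=
  -- ctrl = [list, 1, 8, len(list)]
  match pvGetBits decrypted_binary_codes_list 1 8 1 0 with
  | none => -1
  | some (t, w, b) =>
    pvLoopA decrypted_binary_codes_list (32 * decrypted_binary_codes_list.length) w b 1 t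

-- ===== PORT B =====

-- _field(words, pos, n): n bits MSB-first from absolute bit position pos, out of a
-- 64-bit two-word window.  'words[wi] & 0xFFFFFFFF' is the floor-mod by 2^32 (exact,
-- nonnegative, tracked as a Nat); 'chunk |= low' is '+' (the bit ranges are disjoint);
-- '(chunk >> s) & ((1 << n) - 1)' is div-then-mod, exact since chunk ≥ 0.
def pvField (ws : List Int) (pos n : Nat) : Option Int :=
  if 32 * ws.length < pos + n then none
  else
    let wi := pos / 32
    let bi := pos % 32
    let chunk : Nat :=
      (PySem.Int.mod (ws.getD wi 0) 4294967296).toNat * 4294967296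
        + (if 32 < bi + n then (PySem.Int.mod (ws.getD (wi + 1) 0) 4294967296).toNat else 0)
    some ((chunk / 2 ^ (64 - bi - n)) % 2 ^ n : Nat)

-- the 'while t == 0' loop of B, over the absolute bit position.  fuel is the same
-- totalization guard as in pvLoopA and is likewise never reached before the natural exit.
def pvLoopB (ws : List Int) (fuel : Nat) (pos : Nat) (t : Int) : Int :=
  if t = 0 then
    match fuel with
    | 0 => -1
    | Nat.succ fuel =>
      match pvField ws pos 3 with
      | none => -1
      | some idx =>
        match PySem.List.pyGet? pvBITSTRINGLEN idx with
        | none => -1   -- unreachable: 0 ≤ idx < 8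
        | some elen =>
          let pos2 := pos + 3 + elen.toNat   -- elen positive, .toNat exact
          if 32 * ws.length < pos2 then -1
          else
            match pvField ws pos2 1 with
            | none => -1
            | some t' => pvLoopB ws fuel (pos2 + 1) t'
  else
    1 + PySem.Int.floordiv ((pos : Int) - 40 - 24 + 63) 64

def arm_read_verifier_python_alt (decrypted_binary_codes_list : List Int) : Int :=
  match pvField decrypted_binary_codes_list 40 1 with
  | none => -1
  | some t => pvLoopB decrypted_binary_codes_list (32 * decrypted_binary_codes_list.length) 41 t

-- ===== PRECONDITION & SPEC =====
def Spec_arm_read_verifier_python (decrypted_binary_codes_list : List Int) (out : Int) : Prop := out = arm_read_verifier_python_alt decrypted_binary_codes_list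
instance (decrypted_binary_codes_list : List Int) (out : Int) : Decidable (Spec_arm_read_verifier_python decrypted_binary_codes_list out) := by unfold Spec_arm_read_verifier_python; infer_instance

-- ===== CLAIM (what is proved, stated in full; the proofs are below) =====
def Claim_equal_arm_read_verifier_python : Prop := ∀ (decrypted_binary_codes_list : List Int), Dom_arm_read_verifier_python decrypted_binary_codes_list → Spec_arm_read_verifier_python decrypted_binary_codes_list (arm_read_verifier_python decrypted_binary_codes_list)

-- ===== LEMMAS AND PROOFS =====

-- invariant of getbitstring used only for the termination / state-bounds of the main loop:
-- a successful read of n bits advances the absolute bit position 32*w + b by exactly n and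
-- keeps it within the bitstream.
theorem pvGetBits_adv (ws : List Int) : ∀ (n : Nat) (w b acc v w' b' : Int),
    0 ≤ b → b ≤ 32 → 0 ≤ w →
    pvGetBits ws w b n acc = some (v, w', b') →
    32 * w' + b' = 32 * w + b + n ∧ 0 ≤ b' ∧ b' ≤ 32 ∧ 0 ≤ w' ∧
      (1 ≤ n → 32 * w + b < 32 * ws.length ∧ 32 * w' + b' ≤ 32 * ws.length) := by
  intro n
  induction n with
  | zero =>
    intro w b acc v w' b' hb0 hb1 hw h
    simp [pvGetBits] at h
    obtain ⟨rfl, rfl, rfl⟩ := h.2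
    exact ⟨by omega, hb0, hb1, hw, by omega⟩
  | succ m ih =>
    intro w b acc v w' b' hb0 hb1 hw h
    rw [pvGetBits] at h
    simp only at h
    set wn := if 31 < b then w + 1 else w with hwn
    set bn := if 31 < b then (0:Int) else b with hbn
    have hbn0 : 0 ≤ bn := by rw [hbn]; split <;> omega
    have hbn1 : bn ≤ 31 := by rw [hbn]; split <;> omega
    have hwn0 : 0 ≤ wn := by rw [hwn]; split <;> omega
    have hpos : 32 * wn + bn = 32 * w + b ∨ (b = 32 ∧ 32 * wn + bn = 32 * w + b) := by
      rw [hwn, hbn]; split <;> [right; left] <;> omega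
    have hpeq : 32 * wn + bn = 32 * w + b := by rcases hpos with h' | ⟨_, h'⟩ <;> exact h'
    split at h
    · exact absurd h (by simp)
    · rename_i hlt
      push_neg at hlt
      have hwnlen : wn < (ws.length : Int) := hlt
      rcases hcw : PySem.List.pyGet? ws wn with _ | cw
      · rw [hcw] at h; exact absurd h (by simp)
      · rw [hcw] at h
        have := ih wn (bn + 1) (acc * 2 + PySem.Int.mod (PySem.Int.floordiv cw (2 ^ (31 - bn).toNat)) 2)
          v w' b' (by omega) (by omega) hwn0 h
        obtain ⟨e1, f1, f2, f3, fr⟩ := this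
        refine ⟨by omega, f1, f2, f3, fun _ => ⟨by omega, ?_⟩⟩
        rcases Nat.eq_zero_or_pos m with rfl | hm
        · omega
        · exact (fr hm).2

-- reference semantics: the k-th bit of the stream (MSB-first within each 32-bit word)
def pvBit (ws : List Int) (p : Nat) : Nat :=
  ((PySem.Int.mod (ws.getD (p / 32) 0) 4294967296).toNat / 2 ^ (31 - p % 32)) % 2

-- reference value of n bits read MSB-first from position pos into accumulator acc
def pvRef (ws : List Int) : Nat → Nat → Nat → Nat
  | _,   0,     acc => acc
  | pos, n + 1, acc => pvRef ws (pos + 1) n (acc * 2 + pvBit ws pos)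

theorem pvBit_lt_two (ws : List Int) (p : Nat) : pvBit ws p < 2 :=
  Nat.mod_lt _ (by omega)

theorem pvRef_acc (ws : List Int) : ∀ (n pos acc : Nat),
    pvRef ws pos n acc = acc * 2 ^ n + pvRef ws pos n 0 := by
  intro n
  induction n with
  | zero => intro pos acc; simp [pvRef]
  | succ m ih =>
    intro pos acc
    rw [pvRef, pvRef, ih (pos + 1) (acc * 2 + pvBit ws pos), ih (pos + 1) (0 * 2 + pvBit ws pos)]
    ring

theorem pvRef_lt (ws : List Int) : ∀ (n pos acc : Nat),
    pvRef ws pos n acc < (acc + 1) * 2 ^ n := by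
  intro n
  induction n with
  | zero => intro pos acc; simp [pvRef]
  | succ m ih =>
    intro pos acc
    rw [pvRef]
    calc pvRef ws (pos + 1) m (acc * 2 + pvBit ws pos)
        < (acc * 2 + pvBit ws pos + 1) * 2 ^ m := ih _ _
      _ ≤ (acc + 1) * 2 ^ (m + 1) := by
        have := pvBit_lt_two ws pos
        have h2 : (0:Nat) < 2 ^ m := Nat.two_pow_pos m
        ring_nf
        nlinarith

-- one extracted bit of A equals the reference bit
theorem pvBit_of_word (z : Int) (k : Nat) (hk : k ≤ 31) :
    PySem.Int.mod (PySem.Int.floordiv z (2 ^ k)) 2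
      = (((PySem.Int.mod z 4294967296).toNat / 2 ^ k) % 2 : Nat) := by
  rw [PySem.Int.floordiv_eq_ediv_of_pos (by positivity), PySem.Int.mod_eq_emod_of_pos (by omega),
      PySem.Int.mod_eq_emod_of_pos (by omega)]
  have hM : (4294967296 : Int) = 2 ^ k * (2 * 2 ^ (31 - k)) := by
    rw [show (4294967296 : Int) = 2 ^ 32 by norm_num, ← pow_succ', ← pow_add]
    congr 1
    omega
  have hcast : ((((z % 4294967296).toNat / 2 ^ k) % 2 : Nat) : Int)
      = ((z % 4294967296) / 2 ^ k) % 2 := by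
    have h0 : ((z % 4294967296).toNat : Int) = z % 4294967296 :=
      Int.toNat_of_nonneg (Int.emod_nonneg z (by norm_num))
    push_cast [h0]
    rfl
  rw [hcast]
  have key : z / 2 ^ k = (z % 4294967296) / 2 ^ k + (z / 4294967296) * (2 * 2 ^ (31 - k)) := by
    conv_lhs => rw [show z = z % 4294967296 + (z / 4294967296 * (2 * 2 ^ (31 - k))) * 2 ^ k by
      conv_lhs => rw [← Int.emod_add_mul_ediv z 4294967296]
      rw [hM]; ring]
    rw [Int.add_mul_ediv_right _ _ (by positivity : (2:Int)^k ≠ 0)]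
  rw [key, show (z % 4294967296) / 2 ^ k + (z / 4294967296) * (2 * 2 ^ (31 - k))
      = (z % 4294967296) / 2 ^ k + (z / 4294967296 * 2 ^ (31 - k)) * 2 by ring]
  set A := z % 4294967296 / 2 ^ k
  set B := z / 4294967296 * 2 ^ (31 - k)
  omega

-- full characterisation of getbitstring_python in terms of the reference semantics
theorem pvGetBits_char (ws : List Int) : ∀ (n : Nat) (w b : Int) (acc pos : Nat),
    0 ≤ b → b ≤ 32 → 0 ≤ w → 32 * w + b = (pos : Int) →
    (pos + n ≤ 32 * ws.length →
      ∃ w' b', pvGetBits ws w b n acc = some ((↑(pvRef ws pos n acc) : Int), w', b')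
        ∧ 32 * w' + b' = (pos : Int) + n)
    ∧ (32 * ws.length < pos + n → 1 ≤ n → pvGetBits ws w b n acc = none) := by
  intro n
  induction n with
  | zero =>
    intro w b acc pos hb0 hb1 hw hpos
    exact ⟨fun _ => ⟨w, b, by simp [pvGetBits, pvRef], by omega⟩, fun _ h => by omega⟩
  | succ m ih =>
    intro w b acc pos hb0 hb1 hw hpos
    rw [pvGetBits]
    simp only
    set wn := if 31 < b then w + 1 else w with hwn
    set bn := if 31 < b then (0:Int) else b with hbn
    have hbn0 : 0 ≤ bn := by rw [hbn]; split <;> omega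
    have hbn1 : bn ≤ 31 := by rw [hbn]; split <;> omega
    have hwn0 : 0 ≤ wn := by rw [hwn]; split <;> omega
    have hpeq : 32 * wn + bn = (pos : Int) := by rw [hwn, hbn]; split <;> omega
    constructor
    · intro hle
      -- success: pos < 32*len, so the guard passes and the word is there
      have hwlt : wn < (ws.length : Int) := by omega
      rw [if_neg (by omega)]
      have hidx : wn.toNat < ws.length := by omega
      have hget : PySem.List.pyGet? ws wn = some ws[wn.toNat] :=
        PySem.List.pyGet?_eq_some_getElem ws hwn0 (by exact_mod_cast hwlt)
      rw [hget]
      dsimp only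
      have hdiv : pos / 32 = wn.toNat := by omega
      have hz : ws.getD (pos / 32) 0 = ws[wn.toNat] := by
        rw [hdiv, List.getD_eq_getElem ws 0 hidx]
      have hexp : (31 - bn).toNat = 31 - pos % 32 := by omega
      have hbit : PySem.Int.mod (PySem.Int.floordiv ws[wn.toNat] (2 ^ (31 - bn).toNat)) 2
          = (pvBit ws pos : Int) := by
        rw [pvBit_of_word _ _ (by omega), hexp]
        unfold pvBit
        rw [hz]
      rw [hbit]
      have hcast : acc * 2 + (pvBit ws pos : Int) = ((acc * 2 + pvBit ws pos : Nat) : Int) := by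
        push_cast; ring
      rw [hcast]
      have := (ih wn (bn + 1) (acc * 2 + pvBit ws pos) (pos + 1) (by omega) (by omega) hwn0
        (by omega)).1 (by omega)
      obtain ⟨w', b', hrec, hend⟩ := this
      exact ⟨w', b', by rw [hrec]; rfl, by omega⟩
    · intro hgt _
      by_cases hwl : (ws.length : Int) ≤ wn
      · rw [if_pos hwl]
      · rw [if_neg hwl]
        push_neg at hwl
        have hidx : wn.toNat < ws.length := by omega
        have hget : PySem.List.pyGet? ws wn = some ws[wn.toNat] :=
          PySem.List.pyGet?_eq_some_getElem ws hwn0 (by exact_mod_cast hwl)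
        rw [hget]
        dsimp only
        have hdiv : pos / 32 = wn.toNat := by omega
        have hz : ws.getD (pos / 32) 0 = ws[wn.toNat] := by
          rw [hdiv, List.getD_eq_getElem ws 0 hidx]
        have hexp : (31 - bn).toNat = 31 - pos % 32 := by omega
        have hbit : PySem.Int.mod (PySem.Int.floordiv ws[wn.toNat] (2 ^ (31 - bn).toNat)) 2
            = (pvBit ws pos : Int) := by
          rw [pvBit_of_word _ _ (by omega), hexp]
          unfold pvBit
          rw [hz]
        have hcast : (acc : Int) * 2 + (pvBit ws pos : Int)
            = ((acc * 2 + pvBit ws pos : Nat) : Int) := by push_cast; ring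
        rw [hbit, hcast]
        rcases Nat.eq_zero_or_pos m with rfl | hm
        · omega   -- m = 0: pos + 1 > 32*len contradicts pos < 32*len
        · exact (ih wn (bn + 1) _ (pos + 1) (by omega) (by omega) hwn0 (by omega)).2
            (by omega) hm

theorem pvChunk_bit_lo (m0 m1 : Nat) (h1 : m1 < 4294967296) (j : Nat) (hj : j ≤ 31) :
    (m0 * 4294967296 + m1) / 2 ^ (63 - j) % 2 = m0 / 2 ^ (31 - j) % 2 := by
  rw [show 63 - j = 32 + (31 - j) by omega, pow_add, ← Nat.div_div_eq_div_mul]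
  congr 2
  rw [show (4294967296 : Nat) = 2 ^ 32 by norm_num] at *
  rw [Nat.add_comm, Nat.add_mul_div_right _ _ (by positivity), Nat.div_eq_of_lt h1, Nat.zero_add]

theorem pvChunk_bit_hi (m0 m1 : Nat) (j : Nat) (hj : 32 ≤ j) (hj2 : j ≤ 63) :
    (m0 * 4294967296 + m1) / 2 ^ (63 - j) % 2 = m1 / 2 ^ (63 - j) % 2 := by
  have hsplit : m0 * 4294967296 + m1 = m1 + (m0 * 2 ^ (j - 32) * 2) * 2 ^ (63 - j) := by
    rw [show (4294967296 : Nat) = 2 ^ 32 by norm_num]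
    rw [show m0 * 2 ^ (j - 32) * 2 * 2 ^ (63 - j) = m0 * (2 ^ (j - 32) * 2 ^ 1 * 2 ^ (63 - j)) by ring,
      ← pow_add, ← pow_add, show j - 32 + 1 + (63 - j) = 32 by omega]
    ring
  rw [hsplit, Nat.add_mul_div_right _ _ (by positivity)]
  omega

theorem pvExtract (ws : List Int) (chunk : Nat) : ∀ (n p d : Nat), d + n ≤ 64 →
    (∀ k, k < n → chunk / 2 ^ (63 - (d + k)) % 2 = pvBit ws (p + k)) →
    chunk / 2 ^ (64 - d - n) % 2 ^ n = pvRef ws p n 0 := by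
  intro n
  induction n with
  | zero => intro p d _ _; simp [pvRef, Nat.mod_one]
  | succ m ih =>
    intro p d hd hbits
    have hsplit : chunk / 2 ^ (64 - d - (m + 1)) % 2 ^ (m + 1)
        = chunk / 2 ^ (64 - d - (m + 1)) % 2 ^ m
          + 2 ^ m * (chunk / 2 ^ (64 - d - (m + 1)) / 2 ^ m % 2) := Nat.mod_pow_succ
    have hshift : chunk / 2 ^ (64 - d - (m + 1)) / 2 ^ m = chunk / 2 ^ (63 - d) := by
      rw [Nat.div_div_eq_div_mul, ← pow_add, show 64 - d - (m + 1) + m = 63 - d by omega]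
    have htail : chunk / 2 ^ (64 - d - (m + 1)) % 2 ^ m = pvRef ws (p + 1) m 0 := by
      have := ih (p + 1) (d + 1) (by omega)
        (fun k hk => by
          have := hbits (k + 1) (by omega)
          rw [show d + 1 + k = d + (k + 1) by omega, show p + 1 + k = p + (k + 1) by omega]
          exact this)
      rw [show 64 - (d + 1) - m = 64 - d - (m + 1) by omega] at this
      exact this
    have hhead : chunk / 2 ^ (63 - d) % 2 = pvBit ws p := by
      have := hbits 0 (by omega); simpa using this
    rw [hsplit, hshift, hhead, htail]
    show pvRef ws (p + 1) m 0 + 2 ^ m * pvBit ws p = pvRef ws p (m + 1) 0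
    rw [pvRef, Nat.zero_mul, Nat.zero_add, pvRef_acc ws m (p + 1) (pvBit ws p)]
    ring

-- B's window extraction equals the reference value
theorem pvField_char (ws : List Int) (pos n : Nat) (h1 : 1 ≤ n) (h2 : n ≤ 32) :
    pvField ws pos n
      = if 32 * ws.length < pos + n then none else some ((↑(pvRef ws pos n 0) : Int)) := by
  unfold pvField
  split
  · rfl
  · rename_i hgt
    dsimp only
    have hb31 : pos % 32 ≤ 31 := by omega
    have hm0lt : (PySem.Int.mod (ws.getD (pos / 32) 0) 4294967296).toNat < 4294967296 := by
      have h := PySem.Int.mod_lt (a := ws.getD (pos / 32) 0) (b := 4294967296) (by norm_num)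
      have h' := PySem.Int.mod_nonneg (a := ws.getD (pos / 32) 0) (b := 4294967296) (by norm_num)
      omega
    have hm1lt : (PySem.Int.mod (ws.getD (pos / 32 + 1) 0) 4294967296).toNat < 4294967296 := by
      have h := PySem.Int.mod_lt (a := ws.getD (pos / 32 + 1) 0) (b := 4294967296) (by norm_num)
      have h' := PySem.Int.mod_nonneg (a := ws.getD (pos / 32 + 1) 0) (b := 4294967296) (by norm_num)
      omega
    by_cases hspan : 32 < pos % 32 + n
    · rw [if_pos hspan]
      congr 1
      refine congrArg Nat.cast (pvExtract ws _ n pos (pos % 32) (by omega) ?_)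
      intro k hk
      by_cases hlo : pos % 32 + k ≤ 31
      · rw [pvChunk_bit_lo _ _ hm1lt _ hlo]
        unfold pvBit
        rw [show (pos + k) / 32 = pos / 32 by omega, show (pos + k) % 32 = pos % 32 + k by omega]
      · rw [pvChunk_bit_hi _ _ _ (by omega) (by omega)]
        unfold pvBit
        rw [show (pos + k) / 32 = pos / 32 + 1 by omega,
          show 31 - (pos + k) % 32 = 63 - (pos % 32 + k) by omega]
    · rw [if_neg hspan]
      congr 1
      refine congrArg Nat.cast (pvExtract ws _ n pos (pos % 32) (by omega) ?_)
      intro k hk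
      have hlo : pos % 32 + k ≤ 31 := by omega
      rw [pvChunk_bit_lo _ _ (by norm_num) _ hlo]
      unfold pvBit
      rw [show (pos + k) / 32 = pos / 32 by omega, show (pos + k) % 32 = pos % 32 + k by omega]

theorem pvCount_eq : ∀ (br n : Int), -63 ≤ br →
    pvCount br n = n + (br + 63) / 64 := by
  intro br n
  induction br, n using pvCount.induct with
  | case1 br n h ih =>
    intro _
    rw [pvCount, if_pos h, ih (by omega)]
    omega
  | case2 br n h =>
    intro h2
    rw [pvCount, if_neg h]
    omega

theorem pvBITSTRINGLEN_facts : ∀ x ∈ pvBITSTRINGLEN, (1:Int) ≤ x ∧ x ≤ 32 := by decide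

theorem pvLoop_eq (ws : List Int) : ∀ (fuel : Nat) (w b t : Int) (pos : Nat),
    0 ≤ b → b ≤ 32 → 0 ≤ w →
    32 * w + b = (pos : Int) → 41 ≤ pos → 32 * ws.length ≤ pos + fuel →
    pvLoopA ws fuel w b ((pos : Int) - 40) t = pvLoopB ws fuel pos t := by
  intro fuel
  induction fuel with
  | zero =>
    intro w b t pos hb0 hb1 hw0 hpos h41 hfuel
    rw [pvLoopA, pvLoopB]
    by_cases ht : t = 0
    · rw [if_pos ht, if_pos ht]
    · rw [if_neg ht, if_neg ht,
        pvCount_eq ((pos : Int) - 40 - 24) 1 (by omega),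
        PySem.Int.floordiv_eq_ediv_of_pos (by omega)]
  | succ f ih =>
    intro w b t pos hb0 hb1 hw0 hpos h41 hfuel
    rw [pvLoopA, pvLoopB]
    by_cases ht : t = 0
    swap
    · rw [if_neg ht, if_neg ht,
        pvCount_eq ((pos : Int) - 40 - 24) 1 (by omega),
        PySem.Int.floordiv_eq_ediv_of_pos (by omega)]
    rw [if_pos ht, if_pos ht]
    show (match pvGetBits ws w b 3 0 with
      | none => (-1 : Int)
      | some (idx, w1, b1) =>
        if 8 ≤ idx then -1
        else
          match PySem.List.pyGet? pvBITSTRINGLEN idx with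
          | none => -1
          | some elen =>
            match pvGetBits ws w1 b1 elen.toNat 0 with
            | none => -1
            | some (_, w2, b2) =>
              match pvGetBits ws w2 b2 1 0 with
              | none => -1
              | some (t', w3, b3) => pvLoopA ws f w3 b3 ((pos : Int) - 40 + 3 + elen + 1) t')
      = (match pvField ws pos 3 with
      | none => (-1 : Int)
      | some idx =>
        match PySem.List.pyGet? pvBITSTRINGLEN idx with
        | none => -1
        | some elen =>
          let pos2 := pos + 3 + elen.toNat
          if 32 * ws.length < pos2 then -1
          else
            match pvField ws pos2 1 with
            | none => -1
            | some t' => pvLoopB ws f (pos2 + 1) t')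
    have hchar3 := pvGetBits_char ws 3 w b 0 pos hb0 hb1 hw0 hpos
    split
    · -- A: the 3-bit read failed; so does B's 3-bit field
      rename_i heqA
      have hroom3 : 32 * ws.length < pos + 3 := by
        by_contra hc
        obtain ⟨w1', b1', hA3, _⟩ := hchar3.1 (by omega)
        rw [Nat.cast_zero, heqA] at hA3
        cases hA3
      split
      · rfl
      · rename_i heqB
        rw [pvField_char ws pos 3 (by omega) (by omega), if_pos hroom3] at heqB
        cases heqB
    · -- A: the 3-bit read succeeded
      rename_i idx w1 b1 heqA
      have hroom3 : ¬ (32 * ws.length < pos + 3) := by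
        intro hc
        have h0 := hchar3.2 hc (by omega)
        rw [Nat.cast_zero] at h0
        rw [h0] at heqA
        cases heqA
      obtain ⟨w1', b1', hA3, hend1⟩ := hchar3.1 (by omega)
      rw [Nat.cast_zero, heqA] at hA3
      simp only [Option.some.injEq, Prod.mk.injEq] at hA3
      obtain ⟨hA3a, hA3c, hA3d⟩ := hA3
      subst hA3a hA3c hA3d
      obtain ⟨_, hb10, hb11, hw1, _⟩ :=
        pvGetBits_adv ws 3 w b 0 _ w1 b1 hb0 hb1 hw0 heqA
      set v3 : Nat := pvRef ws pos 3 0 with hv3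
      have hv3lt : v3 < 8 := by
        have := pvRef_lt ws 3 pos 0
        simpa [hv3] using this
      rw [if_neg (by exact_mod_cast Nat.not_le.mpr (by exact_mod_cast hv3lt) : ¬ (8:Int) ≤ (v3:Int))]
      have hlook : PySem.List.pyGet? pvBITSTRINGLEN (v3 : Int) = some pvBITSTRINGLEN[v3] := by
        rw [PySem.List.pyGet?_natCast]
        exact List.getElem?_eq_getElem (by simpa [pvBITSTRINGLEN] using hv3lt)
      rw [hlook]
      dsimp only
      set elen : Int := pvBITSTRINGLEN[v3] with helen
      obtain ⟨hel1, hel32⟩ := pvBITSTRINGLEN_facts elen (by rw [helen]; exact List.getElem_mem _)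
      have heln : (elen.toNat : Int) = elen := Int.toNat_of_nonneg (by omega)
      have hcharE := pvGetBits_char ws elen.toNat w1 b1 0 (pos + 3) hb10 hb11 hw1
        (by push_cast; omega)
      -- resolve B's 3-bit field and BITSTRINGLEN lookup once for all remaining cases
      have hB3 : pvField ws pos 3 = some ((v3 : Nat) : Int) := by
        rw [pvField_char ws pos 3 (by omega) (by omega), if_neg hroom3]
      split
      · -- A: the expansion-data read failed
        rename_i heqAE
        have hroomE : 32 * ws.length < pos + 3 + elen.toNat := by
          by_contra hc
          obtain ⟨w2', b2', hAE, _⟩ := hcharE.1 (by omega)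
          rw [Nat.cast_zero, heqAE] at hAE
          cases hAE
        split
        · rename_i heqB
          rw [hB3] at heqB
        · rename_i idxB heqB
          rw [hB3] at heqB
          injection heqB with heqB
          subst heqB
          rw [hlook]
          dsimp only
          rw [if_pos hroomE]
      · -- A: the expansion-data read succeeded
        rename_i vE w2 b2 heqAE
        have hroomE : ¬ (32 * ws.length < pos + 3 + elen.toNat) := by
          intro hc
          have h0 := hcharE.2 (by omega) (by omega)
          rw [Nat.cast_zero] at h0
          rw [h0] at heqAE
          cases heqAE
        obtain ⟨w2', b2', hAE, hend2⟩ := hcharE.1 (by omega)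
        rw [Nat.cast_zero, heqAE] at hAE
        simp only [Option.some.injEq, Prod.mk.injEq] at hAE
        obtain ⟨hAEa, hAEc, hAEd⟩ := hAE
        subst hAEc hAEd
        obtain ⟨_, hb20, hb21, hw2, _⟩ :=
          pvGetBits_adv ws elen.toNat w1 b1 0 _ w2 b2 hb10 hb11 hw1 heqAE
        have hcharT := pvGetBits_char ws 1 w2 b2 0 (pos + 3 + elen.toNat) hb20 hb21 hw2
          (by push_cast; omega)
        split
        · -- A: the terminator read failed
          rename_i heqAT
          have hroomT : 32 * ws.length < pos + 3 + elen.toNat + 1 := by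
            by_contra hc
            obtain ⟨w3', b3', hAT, _⟩ := hcharT.1 (by omega)
            rw [Nat.cast_zero, heqAT] at hAT
            cases hAT
          split
          · rename_i heqB
            rw [hB3] at heqB
          · rename_i idxB heqB
            rw [hB3] at heqB
            injection heqB with heqB
            subst heqB
            rw [hlook]
            dsimp only
            rw [if_neg hroomE]
            split
            · rfl
            · rename_i heqBT
              rw [pvField_char ws (pos + 3 + elen.toNat) 1 (by omega) (by omega),
                if_pos hroomT] at heqBT
              cases heqBT
        · -- A: the terminator read succeeded; both loops recurse
          rename_i t' w3 b3 heqAT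
          have hroomT : ¬ (32 * ws.length < pos + 3 + elen.toNat + 1) := by
            intro hc
            have h0 := hcharT.2 hc (by omega)
            rw [Nat.cast_zero] at h0
            rw [h0] at heqAT
            cases heqAT
          obtain ⟨w3', b3', hAT, hend3⟩ := hcharT.1 (by omega)
          rw [Nat.cast_zero, heqAT] at hAT
          simp only [Option.some.injEq, Prod.mk.injEq] at hAT
          obtain ⟨hATa, hATc, hATd⟩ := hAT
          subst hATa hATc hATd
          obtain ⟨_, g0, g1, g2, _⟩ :=
            pvGetBits_adv ws 1 w2 b2 0 _ w3 b3 hb20 hb21 hw2 heqAT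
          have hstep := ih w3 b3 ((pvRef ws (pos + 3 + elen.toNat) 1 0 : Nat) : Int)
            (pos + 3 + elen.toNat + 1) g0 g1 g2
            (by push_cast; omega) (by omega) (by omega)
          rw [show (pos : Int) - 40 + 3 + elen + 1
              = ((pos + 3 + elen.toNat + 1 : Nat) : Int) - 40 by push_cast; omega]
          rw [hstep]
          split
          · rename_i heqB
            rw [hB3] at heqB
            cases heqB
          · rename_i idxB heqB
            rw [hB3] at heqB
            injection heqB with heqB
            subst heqB
            rw [hlook]
            dsimp only
            rw [if_neg hroomE]
            split
            · rename_i heqBT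
              rw [pvField_char ws (pos + 3 + elen.toNat) 1 (by omega) (by omega),
                if_neg hroomT] at heqBT
              cases heqBT
            · rename_i tB heqBT
              rw [pvField_char ws (pos + 3 + elen.toNat) 1 (by omega) (by omega),
                if_neg hroomT] at heqBT
              injection heqBT with heqBT
              subst heqBT
              rfl

-- ===== VERDICT (by name: the statement is the Claim_ definition above) =====
theorem arm_read_verifier_python_spec : Claim_equal_arm_read_verifier_python := by
  intro ws _
  unfold Spec_arm_read_verifier_python arm_read_verifier_python arm_read_verifier_python_alt
  have hchar := pvGetBits_char ws 1 1 8 0 40 (by omega) (by omega) (by omega) (by norm_num)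
  split
  · rename_i heqA
    have hroom : 32 * ws.length < 41 := by
      by_contra hc
      obtain ⟨w', b', hA, _⟩ := hchar.1 (by omega)
      rw [Nat.cast_zero, heqA] at hA
      cases hA
    rw [pvField_char ws 40 1 (by omega) (by omega), if_pos (by omega)]
  · rename_i t w b heqA
    have hroom : ¬ (32 * ws.length < 41) := by
      intro hc
      have h0 := hchar.2 (by omega) (by omega)
      rw [Nat.cast_zero] at h0
      rw [h0] at heqA
      cases heqA
    obtain ⟨w', b', hA, hend⟩ := hchar.1 (by omega)
    rw [Nat.cast_zero, heqA] at hA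
    simp only [Option.some.injEq, Prod.mk.injEq] at hA
    obtain ⟨h1, h2, h3⟩ := hA
    subst h1 h2 h3
    rw [pvField_char ws 40 1 (by omega) (by omega), if_neg (by omega)]
    dsimp only
    obtain ⟨_, g0, g1, g2, _⟩ :=
      pvGetBits_adv ws 1 1 8 0 _ w b (by omega) (by omega) (by omega) heqA
    have hstep := pvLoop_eq ws (32 * ws.length) w b ((pvRef ws 40 1 0 : Nat) : Int) 41
      g0 g1 g2 (by push_cast at hend ⊢; omega) (by omega) (by omega)
    rw [show ((41 : Nat) : Int) - 40 = 1 by norm_num] at hstep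
    exact hstep
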